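-- pv_equiv track=rewrite | github.com/ayushb2002/Strivers-SDE-Sheet-Challenge | 67.py | ayushGivesNinjatest
-- ===== SOURCE A (Python) =====
-- def ayushGivesNinjatest(n, m, time):
--     l, h = min(time), sum(time)
--     while l <= h:
--         mid = (l+h) // 2
--         arr = [0]*n
--         i, j = 0, 0
--         flag = 0
--         while j < m:
--             if arr[i] + time[j] <= mid:
--                 arr[i] += time[j]
--                 j+=1
--             else:
--                 i+=1
--                 if i >= n:
--                     flag = 1
--                     break
--         if flag == 1:
--             l = mid+1
--         elif not flag:
--             h = mid-1
--
--     return l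
-- ===== SOURCE B (Python) =====
-- def ayushGivesNinjatest(n, m, time):
--     def fits(cap):
--         used, cur = 1, 0
--         for idx in range(m):
--             t = time[idx]
--             if cur + t <= cap:
--                 cur += t
--             elif t <= cap and used < n:
--                 used += 1
--                 cur = t
--             else:
--                 return False
--         return True
--
--     def go(l, h):
--         if l > h:
--             return l
--         mid = (l + h) // 2
--         if fits(mid):
--             return go(l, mid - 1)
--         return go(mid + 1, h)
--
--     return go(min(time), sum(time))
-- ===== Notes on version B (the rewrite author's own statement) =====
-- stated objective: alternative
-- what changed: The per-probe feasibility check no longer allocates an n-sized worker array and walks it with a retry loop; B counts workers in one pass over the first m jobs with two integers, and the binary search is a recursion instead of a while loop.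
-- outside the precondition, e.g. on ayushGivesNinjatest(1, 3, [5, -5]): A returns 1, B returns 1; on ayushGivesNinjatest(0, 1, [1]): A raises IndexError, B returns 1
import Mathlib
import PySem

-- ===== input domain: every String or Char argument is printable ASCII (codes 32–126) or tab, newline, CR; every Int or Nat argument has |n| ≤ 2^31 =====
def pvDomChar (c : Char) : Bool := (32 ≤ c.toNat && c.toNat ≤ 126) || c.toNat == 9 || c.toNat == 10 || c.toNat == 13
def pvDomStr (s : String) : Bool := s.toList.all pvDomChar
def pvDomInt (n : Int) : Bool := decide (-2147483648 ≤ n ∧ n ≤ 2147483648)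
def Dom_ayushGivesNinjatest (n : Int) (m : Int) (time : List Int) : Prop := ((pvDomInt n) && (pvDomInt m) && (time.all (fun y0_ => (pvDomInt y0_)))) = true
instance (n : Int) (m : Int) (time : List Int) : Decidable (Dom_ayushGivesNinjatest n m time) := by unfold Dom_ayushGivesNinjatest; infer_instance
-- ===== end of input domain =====

-- B replaces A's per-probe worker array and retry loop by a single-pass (workers, load) counter
-- over the jobs, and makes the binary search a recursion; objective: alternative (same result,
-- no [0]*n array built per probe).


-- ===== PORT A =====
-- A's inner `while j < m` loop: state (arr, i, j); returns the flag (true = jobs do not fit).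
def pvLoopA (time : List Int) (n m mid : Int) (arr : List Int) (i j : Int) : Bool :=
  if _hj : j < m then
    let aj := PySem.List.pyGetD arr i 0          -- arr[i]   (in range on Pre_ inputs)
    let tj := PySem.List.pyGetD time j 0         -- time[j]  (in range on Pre_ inputs)
    if aj + tj ≤ mid then
      pvLoopA time n m mid (PySem.List.pySetD arr i (aj + tj)) i (j + 1)
    else
      if _hn : n ≤ i + 1 then true
      else pvLoopA time n m mid arr (i + 1) j
  else false
termination_by ((m - j).toNat + (n - i).toNat)
decreasing_by all_goals simp; omega

-- A's outer `while l <= h` binary search.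
def pvSearchA (time : List Int) (n m : Int) (l h : Int) : Int :=
  if hlh : l ≤ h then
    let mid := PySem.Int.floordiv (l + h) 2
    if pvLoopA time n m mid (List.replicate n.toNat 0) 0 0 then
      pvSearchA time n m (mid + 1) h
    else
      pvSearchA time n m l (mid - 1)
  else l
termination_by (h - l + 1).toNat
decreasing_by
  all_goals have := PySem.Int.floordiv_two_mid_bounds hlh; omega

def ayushGivesNinjatest (n : Int) (m : Int) (time : List Int) : Int :=
  pvSearchA time n m ((PySem.List.min? time (fun x => x)).getD 0) time.sum

-- ===== PORT B =====
-- one step of Source B's `for idx in range(m)` loop; `none` is the early `return False`.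
def pvFitsStep (time : List Int) (n cap : Int) (st : Option (Int × Int)) (idx : Int) :
    Option (Int × Int) :=
  match st with
  | none => none
  | some (used, cur) =>
    let t := PySem.List.pyGetD time idx 0        -- time[idx] (in range on Pre_ inputs)
    if cur + t ≤ cap then some (used, cur + t)
    else if t ≤ cap ∧ used < n then some (used + 1, t)
    else none

def pvFits (time : List Int) (n m cap : Int) : Bool :=
  ((PySem.List.pyRange 0 m 1).foldl (pvFitsStep time n cap) (some (1, 0))).isSome

def pvSearchB (time : List Int) (n m : Int) (l h : Int) : Int :=
  if hlh : l > h then l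
  else
    let mid := PySem.Int.floordiv (l + h) 2
    if pvFits time n m mid then pvSearchB time n m l (mid - 1)
    else pvSearchB time n m (mid + 1) h
termination_by (h - l + 1).toNat
decreasing_by
  all_goals have := PySem.Int.floordiv_two_mid_bounds (show l ≤ h by omega); omega

def ayushGivesNinjatest_alt (n : Int) (m : Int) (time : List Int) : Int :=
  pvSearchB time n m ((PySem.List.min? time (fun x => x)).getD 0) time.sum

-- ===== PRECONDITION & SPEC =====
-- Pre_ excludes: empty `time` (min() raises ValueError); and, when the initial search interval
-- [min(time), sum(time)] is nonempty (so the greedy check actually runs), calls with jobs but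
-- no workers (0 < m, n ≤ 0), on which A always raises IndexError, and calls with m > len(time),
-- on which A raises IndexError unless every probed capacity stops the scan before index
-- len(time), a defensible corner of malformed input where any returned value is accidental.
def Pre_ayushGivesNinjatest (n : Int) (m : Int) (time : List Int) : Prop :=
  time ≠ [] ∧
    ((PySem.List.min? time (fun x => x)).getD 0 ≤ time.sum →
      (m ≤ time.length ∧ (0 < m → 0 < n)))
instance (n : Int) (m : Int) (time : List Int) : Decidable (Pre_ayushGivesNinjatest n m time) := by
  unfold Pre_ayushGivesNinjatest; infer_instance

def pvWitness_ayushGivesNinjatest : Int × Int × List Int := (2, 3, [1, 2, 3])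

def Spec_ayushGivesNinjatest (n : Int) (m : Int) (time : List Int) (out : Int) : Prop := out = ayushGivesNinjatest_alt n m time
instance (n : Int) (m : Int) (time : List Int) (out : Int) : Decidable (Spec_ayushGivesNinjatest n m time out) := by unfold Spec_ayushGivesNinjatest; infer_instance

-- ===== CLAIM (what is proved, stated in full; the proofs are below) =====
def Claim_equal_ayushGivesNinjatest : Prop := ∀ (n : Int) (m : Int) (time : List Int), Dom_ayushGivesNinjatest n m time → Pre_ayushGivesNinjatest n m time → Spec_ayushGivesNinjatest n m time (ayushGivesNinjatest n m time)

-- ===== LEMMAS AND PROOFS =====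

-- Common abstraction of the two feasibility checks: cur = current worker's load,
-- slots = number of workers still usable (current one included), j = next job index.
-- Returns true iff the greedy placement FAILS (A's `flag`).
def pvG (time : List Int) (m mid : Int) (cur slots j : Int) : Bool :=
  if _hj : j < m then
    let t := PySem.List.pyGetD time j 0
    if cur + t ≤ mid then pvG time m mid (cur + t) slots (j + 1)
    else if _hs : slots ≤ 1 then true
    else pvG time m mid 0 (slots - 1) j
  else false
termination_by ((m - j).toNat + (slots - 1).toNat)
decreasing_by all_goals simp; omega

lemma pvLoopA_eq_pvG (time : List Int) (n m mid : Int) :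
    ∀ (N : Nat) (arr : List Int) (i j : Int),
      ((m - j).toNat + (n - i).toNat) ≤ N →
      arr.length = n.toNat → 0 ≤ i → i < n →
      (∀ k : Nat, i.toNat < k → arr[k]? = some 0 ∨ arr[k]? = none) →
      pvLoopA time n m mid arr i j = pvG time m mid (PySem.List.pyGetD arr i 0) (n - i) j := by
  intro N
  induction N with
  | zero =>
    intro arr i j hN hlen hi0 hin hz
    omega
  | succ N ih =>
    intro arr i j hN hlen hi0 hin hz
    rw [pvLoopA, pvG]
    by_cases hj : j < m
    · simp only [dif_pos hj]
      have hilt : i.toNat < arr.length := by omega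
      by_cases hfit : PySem.List.pyGetD arr i 0 + PySem.List.pyGetD time j 0 ≤ mid
      · simp only [if_pos hfit]
        rw [PySem.List.pySetD_of_nonneg arr _ hi0]
        rw [ih ((arr.set i.toNat _)) i (j+1) (by omega) (by simp [hlen]) hi0 hin ?_]
        · congr 1
          rw [PySem.List.pyGetD_eq_getElem _ _ hi0 (by simp [hlen]; omega)]
          simp [List.getElem_set_self]
        · intro k hk
          rw [List.getElem?_set_ne (by omega)]
          exact hz k hk
      · simp only [if_neg hfit]
        by_cases hn1 : n ≤ i + 1
        · simp only [dif_pos hn1]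
          have h1 : n - i ≤ 1 := by omega
          simp only [dif_pos h1]
        · simp only [dif_neg hn1]
          rw [ih arr (i+1) j (by omega) hlen (by omega) (by omega) ?_]
          · have : ¬ (n - i ≤ 1) := by omega
            rw [dif_neg this]
            have hget : PySem.List.pyGetD arr (i+1) 0 = 0 := by
              rw [PySem.List.pyGetD_eq_getElem arr _ (by omega) (by push_cast [hlen]; omega)]
              have := hz (i+1).toNat (by omega)
              rcases this with h | h
              · have : (i+1).toNat < arr.length := by omega
                simp [List.getElem?_eq_getElem this] at h
                exact h
              · rw [List.getElem?_eq_none_iff] at h; omega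
            rw [hget]
            congr 1
            omega
          · intro k hk
            exact hz k (by omega)
    · simp [dif_neg hj]

lemma pvFoldStep_none (time : List Int) (n cap : Int) (xs : List Int) :
    xs.foldl (pvFitsStep time n cap) none = none := by
  induction xs with
  | nil => rfl
  | cons x xs ih => simpa [pvFitsStep] using ih

lemma pvG_stuck (time : List Int) (m mid j : Int) (hj : j < m)
    (ht : ¬ (0 + PySem.List.pyGetD time j 0 ≤ mid)) :
    ∀ (N : Nat) (s : Int), (s - 1).toNat ≤ N → pvG time m mid 0 s j = true := by
  intro N
  induction N with
  | zero =>
    intro s hs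
    rw [pvG]
    simp only [dif_pos hj, if_neg ht]
    rw [dif_pos (by omega)]
  | succ N ih =>
    intro s hs
    rw [pvG]
    simp only [dif_pos hj, if_neg ht]
    by_cases h1 : s ≤ 1
    · rw [dif_pos h1]
    · rw [dif_neg h1]
      exact ih (s - 1) (by omega)

lemma pvFoldB_eq_pvG (time : List Int) (n m cap : Int) :
    ∀ (N : Nat) (j used cur : Int),
      ((m - j).toNat + (n - used).toNat) ≤ N →
      ((PySem.List.pyRange j m 1).foldl (pvFitsStep time n cap) (some (used, cur))).isSome
        = !(pvG time m cap cur (n - used + 1) j) := by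
  intro N
  induction N with
  | zero =>
    intro j used cur hN
    rw [PySem.List.pyRange_one_eq_nil (by omega), pvG]
    simp [show ¬ j < m by omega]
  | succ N ih =>
    intro j used cur hN
    by_cases hj : j < m
    · rw [PySem.List.pyRange_one_cons hj, pvG]
      simp only [List.foldl_cons, dif_pos hj]
      by_cases hfit : cur + PySem.List.pyGetD time j 0 ≤ cap
      · rw [if_pos hfit]
        have hstep : pvFitsStep time n cap (some (used, cur)) j = some (used, cur + PySem.List.pyGetD time j 0) := by
          simp [pvFitsStep, hfit]
        rw [hstep, ih (j+1) used _ (by omega)]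
      · rw [if_neg hfit]
        by_cases hslots : n - used + 1 ≤ 1
        · rw [dif_pos hslots]
          have hstep : pvFitsStep time n cap (some (used, cur)) j = none := by
            simp only [pvFitsStep]
            rw [if_neg hfit, if_neg (by omega)]
          rw [hstep, pvFoldStep_none]
          rfl
        · rw [dif_neg hslots]
          by_cases ht : PySem.List.pyGetD time j 0 ≤ cap
          · have hstep : pvFitsStep time n cap (some (used, cur)) j = some (used + 1, PySem.List.pyGetD time j 0) := by
              simp only [pvFitsStep]
              rw [if_neg hfit, if_pos ⟨ht, by omega⟩]
            have hR : pvG time m cap 0 (n - used + 1 - 1) j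
                = pvG time m cap (PySem.List.pyGetD time j 0) (n - (used + 1) + 1) (j + 1) := by
              rw [pvG]
              simp only [dif_pos hj, zero_add, if_pos ht]
              congr 1
              omega
            rw [hstep, ih (j+1) (used+1) _ (by omega), hR]
          · have hstep : pvFitsStep time n cap (some (used, cur)) j = none := by
              simp only [pvFitsStep]
              rw [if_neg hfit, if_neg (by tauto)]
            rw [hstep, pvFoldStep_none]
            rw [pvG_stuck time m cap j hj (by omega) (n - used).toNat (n - used + 1 - 1) (by omega)]
            rfl
    · rw [PySem.List.pyRange_one_eq_nil (by omega), pvG]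
      simp [hj]

lemma pvCheck_eq (time : List Int) (n m mid : Int) (hmn : 0 < m → 0 < n) :
    pvLoopA time n m mid (List.replicate n.toNat 0) 0 0 = !(pvFits time n m mid) := by
  unfold pvFits
  rw [pvFoldB_eq_pvG time n m mid ((m - 0).toNat + (n - 1).toNat) 0 1 0 le_rfl, Bool.not_not]
  by_cases hm : 0 < m
  · have hn := hmn hm
    rw [pvLoopA_eq_pvG time n m mid ((m - 0).toNat + (n - 0).toNat)
        (List.replicate n.toNat 0) 0 0 le_rfl (by simp) le_rfl hn ?_]
    · have h0 : PySem.List.pyGetD (List.replicate n.toNat 0) 0 (0 : Int) = 0 := by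
        rw [PySem.List.pyGetD_eq_getElem _ _ le_rfl (by simp; omega)]
        simp
      have h1 : n - (0 : Int) = n - 1 + 1 := by omega
      rw [h0, h1]
    · intro k hk
      rcases lt_or_ge k n.toNat with h | h
      · left; simp [h]
      · right; simp; omega
  · rw [pvLoopA, pvG]
    simp [show ¬ (0 : Int) < m from hm]

lemma pvSearch_eq (time : List Int) (n m : Int) (hmn : 0 < m → 0 < n) :
    ∀ (N : Nat) (l h : Int), (h - l + 1).toNat ≤ N →
      pvSearchA time n m l h = pvSearchB time n m l h := by
  intro N
  induction N with
  | zero =>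
    intro l h hN
    rw [pvSearchA, pvSearchB]
    simp [show ¬ l ≤ h by omega, show l > h by omega]
  | succ N ih =>
    intro l h hN
    rw [pvSearchA, pvSearchB]
    by_cases hlh : l ≤ h
    · simp only [dif_pos hlh, dif_neg (show ¬ l > h by omega)]
      have hmid := PySem.Int.floordiv_two_mid_bounds hlh
      rw [pvCheck_eq time n m _ hmn]
      cases hfit : pvFits time n m (PySem.Int.floordiv (l + h) 2)
      · rw [if_pos (by decide), if_neg (by decide)]
        exact ih _ h (by omega)
      · rw [if_neg (by decide), if_pos rfl]
        exact ih l _ (by omega)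
    · simp [hlh, show l > h by omega]

-- ===== VERDICT (by name: the statement is the Claim_ definition above) =====
theorem ayushGivesNinjatest_spec : Claim_equal_ayushGivesNinjatest := by
  intro n m time _hdom hpre
  unfold Spec_ayushGivesNinjatest ayushGivesNinjatest ayushGivesNinjatest_alt
  set l0 := (PySem.List.min? time (fun x => x)).getD 0 with hl0
  by_cases hlh : l0 ≤ time.sum
  · exact pvSearch_eq time n m (hpre.2 hlh).2 _ l0 time.sum le_rfl
  · rw [pvSearchA, pvSearchB]
    simp [hlh]
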